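-- pv_equiv track=rewrite | github.com/euphwes/advent-of-code | 2016/day_9.py | _decompress_file_v1
-- ===== SOURCE A (Python) =====
-- COMPRESSION_MARKER_START = '('
--
-- COMPRESSION_MARKER_STOP  = ')'
--
-- def _extract_compression_data(file_iter):
--     """ Eats through a compressed file iterator and returns the compression marker info, a tuple
--     of the form (next_count, number_times_to_repeat). """
--
--     # Extract the rest of the compression marker
--     buffer = ''
--     while (next_char := next(file_iter)) != COMPRESSION_MARKER_STOP:
--         buffer += next_char
--
--     # The compression marker is of the form "{next_count}x{times_to_repeat}"
--     next_count, repeat_times = buffer.split('x')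
--     next_count = int(next_count)
--     repeat_times = int(repeat_times)
--
--     return (next_count, repeat_times)
--
-- def _decompress_file_v1(compressed_file):
--     """ Decompress the file using the experimental compression format. """
--
--     decompressed = list()
--     file_iter = iter(compressed_file)
--
--     try:
--         while True:
--             # Keep popping characters off
--             next_char = next(file_iter)
--
--             # If we're not inside a compression marker, add the character to the decompressed data
--             if next_char != COMPRESSION_MARKER_START:
--                 decompressed.append(next_char)
--
--             # If we hit a decompression marker...
--             else:
--                 # Extract the compression info from the marker
--                 next_count, repeat_times = _extract_compression_data(file_iter)
--                 # Pull the following chunk of compressed data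
--                 compressed_data = [next(file_iter) for _ in range(next_count)]
--                 # Then repeat the compressed data the specified number of times, adding it to the
--                 # decompressed data
--                 for _ in range(repeat_times):
--                     decompressed.extend(compressed_data)
--
--     except StopIteration:
--         return ''.join(decompressed)
-- ===== SOURCE B (Python) =====
-- def _decompress_file_v1(compressed_file):
--     """ Decompress the file using the experimental compression format. """
--     s = ''.join(compressed_file)
--     out = []
--     i = 0
--     while True:
--         j = s.find('(', i)
--         if j == -1:
--             out.append(s[i:])
--             return ''.join(out)
--         out.append(s[i:j])
--         k = s.index(')', j)
--         count, times = map(int, s[j + 1:k].split('x'))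
--         out.append(s[k + 1:k + 1 + count] * times)
--         i = k + 1 + count
-- ===== Notes on version B (the rewrite author's own statement) =====
-- stated objective: faster
-- what changed: A consumes the input one character at a time through an iterator and relies on catching StopIteration to terminate, while B scans the materialized string with find/index and slices off whole literal runs, marker bodies and repeated chunks, joining the pieces at the end; …
-- outside the precondition, e.g. on _decompress_file_v1('x(2x'): A returns 'x', B raises ValueError; on _decompress_file_v1('(3x2)ab'): A returns '', B returns 'abab'; on _decompress_file_v1('(-1x2)abc'): A returns 'abc', B returns ')abc'
import Mathlib
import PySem

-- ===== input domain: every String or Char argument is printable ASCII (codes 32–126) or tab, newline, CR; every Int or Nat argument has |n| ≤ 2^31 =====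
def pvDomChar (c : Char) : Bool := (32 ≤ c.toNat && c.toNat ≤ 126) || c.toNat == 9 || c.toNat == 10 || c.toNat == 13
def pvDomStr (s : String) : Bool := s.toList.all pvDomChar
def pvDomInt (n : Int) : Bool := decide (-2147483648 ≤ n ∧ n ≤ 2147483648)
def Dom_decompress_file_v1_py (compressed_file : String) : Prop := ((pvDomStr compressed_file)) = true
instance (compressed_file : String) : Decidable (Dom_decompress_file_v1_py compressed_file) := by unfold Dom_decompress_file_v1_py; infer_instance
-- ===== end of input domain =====

-- B replaces A's iterator/exception-driven character-by-character loop by an index-and-find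
-- scan that slices off whole literal runs, marker bodies and repeated chunks at once
-- (measured faster in a timing run); Pre_ restricts the claim to well-formed v1 input
-- (see the comment at Pre_).

-- ===== PORT A =====

-- marker parsing shared by both ports: buffer.split('x') into exactly two parts, int() both
-- (none = Python's ValueError)
def pvParseMarker (buf : List Char) : Option (Int × Int) :=
  match PySem.Chars.splitOn buf ['x'] with
  | [a, b] =>
    match PySem.Int.ofChars? a, PySem.Int.ofChars? b with
    | some n, some m => some (n, m)
    | _, _ => none
  | _ => none

-- _extract_compression_data's buffer loop: chars up to the first ')' plus the remainder
-- (none = the iterator is exhausted first, i.e. StopIteration)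
def pvTakeMarker : List Char → Option (List Char × List Char)
  | [] => none
  | c :: rest =>
    if c = ')' then some ([], rest)
    else
      match pvTakeMarker rest with
      | none => none
      | some (buf, r) => some (c :: buf, r)

theorem pvTakeMarker_length : ∀ {l : List Char} {buf r : List Char},
    pvTakeMarker l = some (buf, r) → r.length < l.length := by
  intro l
  induction l with
  | nil => intro buf r h; simp [pvTakeMarker] at h
  | cons c rest ih =>
    intro buf r h
    by_cases hc : c = ')'
    · simp [pvTakeMarker, hc] at h
      obtain ⟨-, h2⟩ := h
      simp [← h2]
    · cases htm : pvTakeMarker rest with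
      | none => simp [pvTakeMarker, hc, htm] at h
      | some p =>
        obtain ⟨b2, r2⟩ := p
        simp [pvTakeMarker, hc, htm] at h
        obtain ⟨-, h2⟩ := h
        have := ih htm
        simp [← h2, List.length_cons]
        omega

-- the main while-True loop of _decompress_file_v1 (acc = `decompressed`)
def pvLoopA : List Char → List Char → List Char
  | acc, [] => acc
  | acc, c :: rest =>
    if c ≠ '(' then pvLoopA (acc ++ [c]) rest
    else
      match h : pvTakeMarker rest with
      | none => acc           -- StopIteration inside the marker
      | some (buf, rest') =>
        match pvParseMarker buf with
        | none => acc         -- Python raises ValueError here; excluded by Pre_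
        | some (n, m) =>
          if rest'.length < n.toNat then acc   -- StopIteration while reading the chunk
          else pvLoopA
              ((PySem.List.pyRange 0 m 1).foldl (fun a _ => a ++ rest'.take n.toNat) acc)
              (rest'.drop n.toNat)
  termination_by _ l => l.length
  decreasing_by
  · simp
  · have := pvTakeMarker_length h
    have : (rest'.drop n.toNat).length ≤ rest'.length := by simp
    simp
    omega

def decompress_file_v1_py (compressed_file : String) : String :=
  String.ofList (pvLoopA [] compressed_file.toList)

-- ===== PORT B =====

-- Source B's while loop, one recursive step per iteration, working on the remaining input s[i:]
-- (an index into s and slices s[i:j], s[j+1:k], s[k+1:k+1+count] become takeWhile/dropWhile/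
-- slice of the remainder; exact on Pre_, where count ≥ 0):
--   j = s.find('(', i): the literal run s[i:j] is takeWhile (≠ '('); find == -1 iff
--     dropWhile (≠ '(') is empty, and otherwise its tail is everything past the '('
--   k = s.index(')', j): likewise with dropWhile (≠ ')'); empty = ValueError raised
def pvScanB (l : List Char) : List (List Char) :=
  match h1 : l.dropWhile (· ≠ '(') with
  | [] => [l]                                      -- find == -1: append s[i:] and return
  | _ :: r =>
    match h2 : r.dropWhile (· ≠ ')') with
    | [] => [l.takeWhile (· ≠ '(')]                -- s.index raises ValueError; excluded by Pre_
    | _ :: r2 =>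
      match pvParseMarker (r.takeWhile (· ≠ ')')) with
      | none => [l.takeWhile (· ≠ '(')]            -- int() raises ValueError; excluded by Pre_
      | some (cnt, rep) =>
        l.takeWhile (· ≠ '(')
          :: (List.replicate rep.toNat (PySem.List.slice r2 none (some cnt))).flatten
          :: pvScanB (PySem.List.slice r2 (some cnt) none)
  termination_by l.length
  decreasing_by
    have ha : (l.dropWhile (· ≠ '(')).length ≤ l.length := (List.dropWhile_sublist _).length_le
    have hb : (r.dropWhile (· ≠ ')')).length ≤ r.length := (List.dropWhile_sublist _).length_le
    have hc : (PySem.List.slice r2 (some cnt) none).length ≤ r2.length := by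
      simp [PySem.List.slice]
    rw [h1] at ha
    rw [h2] at hb
    simp at ha hb
    omega

def decompress_file_v1_py_alt (compressed_file : String) : String :=
  String.ofList (pvScanB compressed_file.toList).flatten

-- ===== PRECONDITION & SPEC =====

-- Pre_ restricts the claim to well-formed v1 input — every compression marker reached while
-- scanning is closed, its body parses as NxM with N ≥ 0, and at least N characters follow it.
-- Outside this natural domain A either raises ValueError (unparseable marker body; B raises
-- the same) or its value is an accident of its iterator-and-StopIteration implementation
-- (on a truncated marker or chunk it silently returns a partial result, and a negative N
-- makes range(N) empty); B does the straightforward thing there instead (see the cites).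
-- the same grammar, checked by structural recursion on a character budget k (k = the string's
-- length always suffices: every step consumes at least one character), so that the kernel can
-- evaluate Pre_; pvChk_eq_pvWF below proves it equal to pvWF
def pvChk : Nat → List Char → Bool
  | _, [] => true
  | 0, _ :: _ => false
  | k + 1, c :: rest => if c = '(' then (match rest.dropWhile (· ≠ ')'), pvParseMarker (rest.takeWhile (· ≠ ')')) with | _ :: r2, some (n, _) => decide (0 ≤ n) && decide (n.toNat ≤ r2.length) && pvChk k (r2.drop n.toNat) | _, _ => false) else pvChk k rest

def Pre_decompress_file_v1_py (compressed_file : String) : Prop :=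
  pvChk compressed_file.toList.length compressed_file.toList = true
instance (compressed_file : String) : Decidable (Pre_decompress_file_v1_py compressed_file) := by
  unfold Pre_decompress_file_v1_py; infer_instance

def pvWitness_decompress_file_v1_py : String := "ab(3x2)cdef"

def Spec_decompress_file_v1_py (compressed_file : String) (out : String) : Prop :=
  out = decompress_file_v1_py_alt compressed_file
instance (compressed_file : String) (out : String) : Decidable (Spec_decompress_file_v1_py compressed_file out) := by
  unfold Spec_decompress_file_v1_py; infer_instance

-- ===== CLAIM (what is proved, stated in full; the proofs are below) =====
def Claim_equal_decompress_file_v1_py : Prop :=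
  ∀ (compressed_file : String), Dom_decompress_file_v1_py compressed_file →
    Pre_decompress_file_v1_py compressed_file →
    Spec_decompress_file_v1_py compressed_file (decompress_file_v1_py compressed_file)

-- ===== LEMMAS AND PROOFS =====

-- the well-formedness grammar restated as the recursion the equivalence proof follows
def pvWF : List Char → Bool
  | [] => true
  | c :: rest =>
    if c = '(' then
      match h2 : rest.dropWhile (· ≠ ')') with
      | [] => false                                -- marker never closed
      | _ :: r2 =>
        match pvParseMarker (rest.takeWhile (· ≠ ')')) with
        | none => false                            -- marker body is not NxM
        | some (n, _) =>
          decide (0 ≤ n) && decide (n.toNat ≤ r2.length) && pvWF (r2.drop n.toNat)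
    else pvWF rest
  termination_by l => l.length
  decreasing_by
  · have hb : (rest.dropWhile (· ≠ ')')).length ≤ rest.length := (List.dropWhile_sublist _).length_le
    have hc : (r2.drop n.toNat).length ≤ r2.length := by simp
    rw [h2] at hb
    simp at hb
    simp
    omega
  · simp


theorem pv_foldl_append_const {α β : Type} (L : List β) (ch : List α) :
    ∀ acc, L.foldl (fun a _ => a ++ ch) acc = acc ++ (List.replicate L.length ch).flatten := by
  induction L with
  | nil => intro acc; simp
  | cons x xs ih => intro acc; simp [List.foldl, ih, List.replicate_succ]

-- A's loop walks through a run of literal (non-'(') characters by appending them one by one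
theorem pvLoopA_literal : ∀ (pre : List Char), (∀ c ∈ pre, c ≠ '(') →
    ∀ (acc t : List Char), pvLoopA acc (pre ++ t) = pvLoopA (acc ++ pre) t := by
  intro pre
  induction pre with
  | nil => intro _ acc t; simp
  | cons c cs ih =>
    intro hall acc t
    have hc : c ≠ '(' := hall c List.mem_cons_self
    rw [List.cons_append, pvLoopA, if_pos (by simpa using hc)]
    rw [ih (fun x hx => hall x (List.mem_cons_of_mem c hx)) (acc ++ [c]) t]
    simp

theorem pvLoopA_nil (acc : List Char) : pvLoopA acc [] = acc := by rw [pvLoopA]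

-- pvWF ignores a literal prefix
theorem pvWF_literal : ∀ (pre : List Char), (∀ c ∈ pre, c ≠ '(') →
    ∀ (t : List Char), pvWF (pre ++ t) = pvWF t := by
  intro pre
  induction pre with
  | nil => intro _ t; simp
  | cons c cs ih =>
    intro hall t
    have hc : ¬ c = '(' := hall c List.mem_cons_self
    rw [List.cons_append, pvWF, if_neg hc, ih (fun x hx => hall x (List.mem_cons_of_mem c hx)) t]

-- the marker extractor on a split input
theorem pvTakeMarker_of_split : ∀ (buf r : List Char), (∀ x ∈ buf, x ≠ ')') →
    pvTakeMarker (buf ++ ')' :: r) = some (buf, r) := by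
  intro buf
  induction buf with
  | nil => intro r _; simp [pvTakeMarker]
  | cons c bs ih =>
    intro r hall
    have hc : ¬ c = ')' := by simpa using hall c List.mem_cons_self
    rw [List.cons_append, pvTakeMarker, if_neg hc,
      ih r (fun x hx => hall x (List.mem_cons_of_mem c hx))]

-- the head of a non-empty dropWhile fails the predicate
theorem pv_dropWhile_head_false {p : Char → Bool} : ∀ {l : List Char} {x : Char} {r : List Char},
    l.dropWhile p = x :: r → p x = false := by
  intro l
  induction l with
  | nil => intro x r h; simp at h
  | cons c t ih =>
    intro x r h
    rw [List.dropWhile_cons] at h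
    by_cases hc : p c = true
    · rw [if_pos hc] at h; exact ih h
    · rw [if_neg hc] at h
      injection h with h1 _
      subst h1
      simpa using hc

-- the decomposition of the input at its first '(' / of a marker at its first ')'
theorem pv_split (p : Char → Bool) (stop : Char)
    (hp : ∀ x : Char, p x = false → x = stop) :
    ∀ (l : List Char) {x : Char} {r : List Char}, l.dropWhile p = x :: r →
      x = stop ∧ l = l.takeWhile p ++ stop :: r ∧ ∀ c ∈ l.takeWhile p, p c = true := by
  intro l x r h
  have hx : x = stop := by
    have hpx : p x = false := pv_dropWhile_head_false h
    exact hp _ hpx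
  refine ⟨hx, ?_, fun c hc => List.mem_takeWhile_imp hc⟩
  conv_lhs => rw [← List.takeWhile_append_dropWhile (p := p) (l := l)]
  rw [h, hx]

-- pvScanB when the input has no '(' at all
theorem pvScanB_no_paren (l : List Char) (hd1 : l.dropWhile (· ≠ '(') = []) :
    pvScanB l = [l] := by
  rw [pvScanB.eq_def]
  split
  · rfl
  · rename_i x r h
    rw [hd1] at h
    cases h

-- pvScanB at a well-formed marker: literal run, repeated chunk, recurse past the chunk
theorem pvScanB_step (l rest r2 : List Char) (cnt rep : Int)
    (hd1 : l.dropWhile (· ≠ '(') = '(' :: rest)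
    (hd2 : rest.dropWhile (· ≠ ')') = ')' :: r2)
    (hpm : pvParseMarker (rest.takeWhile (· ≠ ')')) = some (cnt, rep)) :
    pvScanB l = l.takeWhile (· ≠ '(')
      :: (List.replicate rep.toNat (PySem.List.slice r2 none (some cnt))).flatten
      :: pvScanB (PySem.List.slice r2 (some cnt) none) := by
  rw [pvScanB.eq_def]
  split
  · rename_i h
    rw [hd1] at h
    cases h
  · rename_i x r h
    rw [hd1] at h
    injection h with hx hr
    subst hr
    split
    · rename_i h
      rw [hd2] at h
      cases h
    · rename_i y r2' h
      rw [hd2] at h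
      injection h with hy hr2
      subst hr2
      rw [hpm]

-- the budgeted checker agrees with pvWF whenever the budget covers the string
theorem pvChk_eq_pvWF : ∀ (N : Nat) (l : List Char), l.length ≤ N → pvChk N l = pvWF l := by
  intro N
  induction N with
  | zero =>
    intro l hl
    have : l = [] := by cases l <;> simp_all
    subst this
    rw [pvWF]
    simp [pvChk]
  | succ N ih =>
    intro l hl
    cases l with
    | nil => rw [pvWF]; simp [pvChk]
    | cons c rest =>
      by_cases hc : c = '('
      · subst hc
        rw [pvWF, if_pos rfl]
        simp only [pvChk]
        cases hd2 : rest.dropWhile (· ≠ ')') with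
        | nil => simp
        | cons y r2 =>
          cases hpm : pvParseMarker (rest.takeWhile (· ≠ ')')) with
          | none => simp
          | some q =>
            obtain ⟨n, m⟩ := q
            have hlen : (r2.drop n.toNat).length ≤ N := by
              have h1 : (rest.dropWhile (· ≠ ')')).length ≤ rest.length :=
                (List.dropWhile_sublist _).length_le
              rw [hd2] at h1
              have h2 : (r2.drop n.toNat).length ≤ r2.length := by simp
              simp at h1 hl
              omega
            simp [ih _ hlen]
      · rw [pvWF, if_neg hc]
        simp only [pvChk, if_neg hc]
        exact ih rest (by simp at hl; omega)

theorem pv_key : ∀ (N : Nat) (l : List Char), l.length ≤ N → pvWF l = true →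
    ∀ acc, pvLoopA acc l = acc ++ (pvScanB l).flatten := by
  intro N
  induction N with
  | zero =>
    intro l hl _ acc
    have : l = [] := by cases l <;> simp_all
    subst this
    rw [pvLoopA_nil, pvScanB_no_paren [] (by simp)]
    simp
  | succ N ih =>
    intro l hl hwf acc
    cases hd1 : l.dropWhile (· ≠ '(') with
    | nil =>
      -- no '(' anywhere: A copies every character, B appends the whole tail
      have hall : ∀ c ∈ l, c ≠ '(' := by
        intro c hc
        simpa using (List.dropWhile_eq_nil_iff.mp hd1) c hc
      have hA := pvLoopA_literal l hall acc []
      simp at hA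
      rw [hA, pvScanB_no_paren l hd1, pvLoopA_nil]
      simp
    | cons x rest =>
      obtain ⟨hx, hsplit, hpre⟩ :=
        pv_split (· ≠ '(') '(' (fun c h => by simpa using h) l hd1
      subst hx
      set pre := l.takeWhile (· ≠ '(') with hprdef
      have hpre' : ∀ c ∈ pre, c ≠ '(' := fun c hc => by simpa using hpre c hc
      -- pvWF at the first marker
      have hwf' : pvWF ('(' :: rest) = true := by
        rw [hsplit, pvWF_literal pre hpre' ('(' :: rest)] at hwf
        exact hwf
      rw [pvWF, if_pos rfl] at hwf'
      cases hd2 : rest.dropWhile (· ≠ ')') with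
      | nil => rw [hd2] at hwf'; simp at hwf'
      | cons y r2 =>
        obtain ⟨hy, hsplit2, hbuf⟩ :=
          pv_split (· ≠ ')') ')' (fun c h => by simpa using h) rest hd2
        subst hy
        set buf := rest.takeWhile (· ≠ ')') with hbdef
        rw [hd2] at hwf'
        cases hpm : pvParseMarker buf with
        | none => rw [hpm] at hwf'; simp at hwf'
        | some q =>
          obtain ⟨n, m⟩ := q
          rw [hpm] at hwf'
          simp only [Bool.and_eq_true, decide_eq_true_eq] at hwf'
          obtain ⟨⟨hn0, hnlen⟩, hwfrec⟩ := hwf'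
          -- B takes one scan step at this marker
          rw [pvScanB_step l rest r2 n m hd1 hd2 hpm]
          -- A eats the literal run, then meets the '('
          conv_lhs => rw [hsplit]
          rw [pvLoopA_literal pre hpre' acc ('(' :: rest), pvLoopA, if_neg (by simp)]
          -- A's marker extraction returns exactly (buf, r2)
          have htm : pvTakeMarker rest = some (buf, r2) := by
            rw [hsplit2]
            exact pvTakeMarker_of_split buf r2 (fun z hz => by simpa using hbuf z hz)
          -- reduce A's match on the extraction result, then on the parse
          split
          · rename_i h0
            rw [htm] at h0
            cases h0
          · rename_i buf1 rest1 h0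
            rw [htm] at h0
            injection h0 with h0
            injection h0 with hb1 hr1
            subst hb1
            subst hr1
            rw [hpm]
            split
            · rename_i h1
              cases h1
            · rename_i n' m' h1
              injection h1 with h1
              injection h1 with hn' hm'
              subst hn'
              subst hm'
              rw [if_neg (by omega)]
              -- both sides repeat the n-char chunk m times, then continue after it
              have hcast : n = ((n.toNat : Nat) : Int) := (Int.toNat_of_nonneg hn0).symm
              rw [hcast, PySem.List.slice_to_natCast, PySem.List.slice_from_natCast]
              simp only [Int.toNat_natCast]
              have hlen2 : (r2.drop n.toNat).length ≤ N := by
                have h2 : (r2.drop n.toNat).length ≤ r2.length := by simp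
                have h3 : pre.length + ('(' :: rest).length = l.length := by
                  rw [hsplit]; simp
                have h4 : buf.length + (')' :: r2).length = rest.length := by
                  rw [hsplit2]; simp
                simp at h3 h4
                omega
              rw [ih _ hlen2 hwfrec, pv_foldl_append_const]
              simp [PySem.List.length_pyRange_one]
              simp [hprdef]

-- ===== VERDICT (by name: the statement is the Claim_ definition above) =====
theorem decompress_file_v1_py_spec : Claim_equal_decompress_file_v1_py := by
  intro s _ hpre
  unfold Spec_decompress_file_v1_py decompress_file_v1_py decompress_file_v1_py_alt
  rw [pv_key s.toList.length s.toList le_rfl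
    (by rw [← pvChk_eq_pvWF s.toList.length s.toList le_rfl]; exact hpre)]
  simp
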